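-- pv_equiv track=rewrite | github.com/guita237/KI-Testcase | Backend/app/utils/nlp_utils.py | parse_test_cases
-- ===== SOURCE A (Python) =====
-- from typing import Dict, List, Optional
--
-- def parse_test_cases(raw_text: str, format: str = "classic") -> List[Dict]:
--     """
--     Analyse la réponse brute selon le format spécifié.
--     Retourne une liste de dictionnaires {name, full_description}
--     """
--     test_cases = []
--
--     if format == "bdd":
--         current_feature = ""
--         for line in raw_text.split("\n"):
--             line = line.strip()
--             if line.startswith("Feature:"):
--                 current_feature = line[8:].strip()
--             elif line.startswith("Scenario:"):
--                 scenario = line[9:].strip()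
--                 test_cases.append({
--                     "name": f"{current_feature} - {scenario}",
--                     "full_description": raw_text  # Stocke tout le feature/scenario
--                 })
--     else:
--         current_case = None
--         buffer = []
--
--         for line in raw_text.split("\n"):
--             line = line.strip()
--             if line.startswith("Name: TC"):
--                 if current_case:
--                     current_case["full_description"] = "\n".join(buffer)
--                     test_cases.append(current_case)
--                 current_case = {
--                     "name": line[5:].strip(),  # Enlève "Name:"
--                     "full_description": ""
--                 }
--                 buffer = [line]
--             elif current_case:
--                 buffer.append(line)
--
--         if current_case:
--             current_case["full_description"] = "\n".join(buffer)
--             test_cases.append(current_case)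
--
--     return test_cases
-- ===== SOURCE B (Python) =====
-- def parse_test_cases(raw_text: str, format: str = "classic"):
--     if format == "bdd":
--         cases = []
--         feature = ""
--         for line in raw_text.split("\n"):
--             line = line.strip()
--             if line.startswith("Feature:"):
--                 feature = line[8:].strip()
--             elif line.startswith("Scenario:"):
--                 cases.append({"name": feature + " - " + line[9:].strip(),
--                               "full_description": raw_text})
--         return cases
--     lines = [l.strip() for l in raw_text.split("\n")]
--     bounds = [i for i, l in enumerate(lines) if l.startswith("Name: TC")]
--     return [{"name": lines[b][5:].strip(),
--              "full_description": "\n".join(lines[b:e])}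
--             for b, e in zip(bounds, bounds[1:] + [len(lines)])]
-- ===== Notes on version B (the rewrite author's own statement) =====
-- stated objective: alternative
-- what changed: The classic branch's flush-on-transition accumulator (current_case/buffer with a final flush) is replaced by a boundary-index-then-segment decomposition: strip all lines once, collect the indices of the test-case header lines, and build each case from the slice of stripped lines between consecutive boundaries; the bdd branch stays a plain scan.
import Mathlib
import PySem

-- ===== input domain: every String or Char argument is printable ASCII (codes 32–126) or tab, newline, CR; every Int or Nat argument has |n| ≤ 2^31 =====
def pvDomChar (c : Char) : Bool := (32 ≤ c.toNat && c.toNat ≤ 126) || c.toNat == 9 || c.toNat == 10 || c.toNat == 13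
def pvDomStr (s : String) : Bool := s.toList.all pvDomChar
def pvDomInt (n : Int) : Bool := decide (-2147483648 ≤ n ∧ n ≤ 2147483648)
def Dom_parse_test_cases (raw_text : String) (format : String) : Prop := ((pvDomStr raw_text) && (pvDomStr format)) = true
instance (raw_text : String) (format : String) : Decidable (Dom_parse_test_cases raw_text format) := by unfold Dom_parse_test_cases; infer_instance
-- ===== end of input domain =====

-- B replaces A's flush-on-transition accumulator (current_case/buffer) in the classic branch by a
-- boundary-index-then-segment decomposition: collect the indices of the test-case header lines, then
-- slice the stripped lines between consecutive boundaries (objective: alternative decomposition, same cost).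

-- ===== PORT A =====
def parse_test_cases (raw_text : String) (format : String) : List (List (String × String)) :=
  if format == "bdd" then
    (((PySem.Str.split? raw_text "\n").getD []).foldl
      (fun (st : List (List (String × String)) × String) line =>
        let line := PySem.Str.strip line
        if PySem.Str.startswith line "Feature:" then
          (st.1, PySem.Str.strip (PySem.Str.slice line (some 8) none))
        else if PySem.Str.startswith line "Scenario:" then
          (st.1 ++ [[("name", st.2 ++ " - " ++ PySem.Str.strip (PySem.Str.slice line (some 9) none)),
                     ("full_description", raw_text)]], st.2)
        else st)
      ([], "")).1
  else
    let st := ((PySem.Str.split? raw_text "\n").getD []).foldl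
      (fun (st : List (PySem.Dict String String) × Option (PySem.Dict String String) × List String) line =>
        let line := PySem.Str.strip line
        if PySem.Str.startswith line "Name: TC" then
          ((match st.2.1 with
            | some c => st.1 ++ [c.insert "full_description" (PySem.Str.join "\n" st.2.2)]
            | none => st.1),
           some ((PySem.Dict.empty.insert "name"
                    (PySem.Str.strip (PySem.Str.slice line (some 5) none))).insert "full_description" ""),
           [line])
        else
          match st.2.1 with
          | some _ => (st.1, st.2.1, st.2.2 ++ [line])
          | none => st)
      ([], none, [])
    (match st.2.1 with
     | some c => st.1 ++ [c.insert "full_description" (PySem.Str.join "\n" st.2.2)]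
     | none => st.1).map (fun (d : PySem.Dict String String) => d.items)

-- ===== PORT B =====
def parse_test_cases_alt (raw_text : String) (format : String) : List (List (String × String)) :=
  if format == "bdd" then
    (((PySem.Str.split? raw_text "\n").getD []).foldl
      (fun (st : List (List (String × String)) × String) line =>
        let line := PySem.Str.strip line
        if PySem.Str.startswith line "Feature:" then
          (st.1, PySem.Str.strip (PySem.Str.slice line (some 8) none))
        else if PySem.Str.startswith line "Scenario:" then
          (st.1 ++ [[("name", st.2 ++ " - " ++ PySem.Str.strip (PySem.Str.slice line (some 9) none)),
                     ("full_description", raw_text)]], st.2)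
        else st)
      ([], "")).1
  else
    let lines := ((PySem.Str.split? raw_text "\n").getD []).map PySem.Str.strip
    let bounds := ((PySem.List.enumerate lines).filter
        (fun p => PySem.Str.startswith p.2 "Name: TC")).map (·.1)
    (bounds.zip (bounds.drop 1 ++ [(lines.length : Int)])).map
      (fun be =>
        [("name", PySem.Str.strip (PySem.Str.slice ((PySem.List.pyGet? lines be.1).getD "") (some 5) none)),
         ("full_description", PySem.Str.join "\n" (PySem.List.slice lines (some be.1) (some be.2)))])

-- ===== PRECONDITION & SPEC =====
def Spec_parse_test_cases (raw_text : String) (format : String) (out : List (List (String × String))) : Prop := out = parse_test_cases_alt raw_text format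
instance (raw_text : String) (format : String) (out : List (List (String × String))) : Decidable (Spec_parse_test_cases raw_text format out) := by unfold Spec_parse_test_cases; infer_instance

-- ===== CLAIM (what is proved, stated in full; the proofs are below) =====
def Claim_equal_parse_test_cases : Prop := ∀ (raw_text : String) (format : String), Dom_parse_test_cases raw_text format → Spec_parse_test_cases raw_text format (parse_test_cases raw_text format)

-- ===== LEMMAS AND PROOFS =====

def pvIsB (l : String) : Bool := PySem.Str.startswith l "Name: TC"

def pvMk (head : String) (body : List String) : List (String × String) :=
  [("name", PySem.Str.strip (PySem.Str.slice head (some 5) none)),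
   ("full_description", PySem.Str.join "\n" body)]

-- canonical segment decomposition of the (already stripped) lines
def pvG : List String → List (List (String × String))
  | [] => []
  | l :: ls => if pvIsB l then pvMk l (l :: ls.takeWhile (fun x => !pvIsB x)) :: pvG ls else pvG ls

-- A's loop step and finalisation
def pvStepA (st : List (PySem.Dict String String) × Option (PySem.Dict String String) × List String)
    (line : String) : List (PySem.Dict String String) × Option (PySem.Dict String String) × List String :=
  let line := PySem.Str.strip line
  if PySem.Str.startswith line "Name: TC" then
    ((match st.2.1 with
      | some c => st.1 ++ [c.insert "full_description" (PySem.Str.join "\n" st.2.2)]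
      | none => st.1),
     some ((PySem.Dict.empty.insert "name"
              (PySem.Str.strip (PySem.Str.slice line (some 5) none))).insert "full_description" ""),
     [line])
  else
    match st.2.1 with
    | some _ => (st.1, st.2.1, st.2.2 ++ [line])
    | none => st

def pvFinA (st : List (PySem.Dict String String) × Option (PySem.Dict String String) × List String) :
    List (List (String × String)) :=
  (match st.2.1 with
   | some c => st.1 ++ [c.insert "full_description" (PySem.Str.join "\n" st.2.2)]
   | none => st.1).map (fun (d : PySem.Dict String String) => d.items)

-- B's boundary indices, item builder, and segment list
def pvBnd (xs : List String) (s : Int) : List Int :=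
  ((PySem.List.enumerate xs s).filter (fun p => pvIsB p.2)).map (·.1)

def pvItem (lines : List String) (be : Int × Int) : List (String × String) :=
  [("name", PySem.Str.strip (PySem.Str.slice ((PySem.List.pyGet? lines be.1).getD "") (some 5) none)),
   ("full_description", PySem.Str.join "\n" (PySem.List.slice lines (some be.1) (some be.2)))]

def pvSegs (xs : List String) : List (List (String × String)) :=
  ((pvBnd xs 0).zip ((pvBnd xs 0).drop 1 ++ [(xs.length : Int)])).map (pvItem xs)

lemma pvItemsLit (nm d : String) :
    (((PySem.Dict.empty.insert "name" nm).insert "full_description" "").insert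
      "full_description" d).items = [("name", nm), ("full_description", d)] := rfl

lemma pvGet_shift (x : String) (xs : List String) (b : Int) (hb : 0 ≤ b) :
    PySem.List.pyGet? (x :: xs) (b + 1) = PySem.List.pyGet? xs b := by
  obtain ⟨n, rfl⟩ := Int.eq_ofNat_of_zero_le hb
  rw [show ((n : Int) + 1) = ((n + 1 : Nat) : Int) from by push_cast; ring,
    PySem.List.pyGet?_natCast, PySem.List.pyGet?_natCast]
  simp

lemma pvSlice_shift (x : String) (xs : List String) (b e : Int) (hb : 0 ≤ b) (he : 0 ≤ e) :
    PySem.List.slice (x :: xs) (some (b + 1)) (some (e + 1)) = PySem.List.slice xs (some b) (some e) := by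
  obtain ⟨m, rfl⟩ := Int.eq_ofNat_of_zero_le hb
  obtain ⟨k, rfl⟩ := Int.eq_ofNat_of_zero_le he
  rw [show ((m : Int) + 1) = ((m + 1 : Nat) : Int) from by push_cast; ring,
    show ((k : Int) + 1) = ((k + 1 : Nat) : Int) from by push_cast; ring,
    PySem.List.slice_natCast, PySem.List.slice_natCast]
  simp

lemma pvItem_shift (x : String) (xs : List String) (b e : Int) (hb : 0 ≤ b) (he : 0 ≤ e) :
    pvItem (x :: xs) (b + 1, e + 1) = pvItem xs (b, e) := by
  simp only [pvItem, pvGet_shift x xs b hb, pvSlice_shift x xs b e hb he]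

lemma pvBnd_cons (x : String) (xs : List String) (s : Int) :
    pvBnd (x :: xs) s = (if pvIsB x then [s] else []) ++ pvBnd xs (s + 1) := by
  simp [pvBnd, PySem.List.enumerate_cons, List.filter_cons]; split <;> simp

lemma pvBnd_shift (xs : List String) : ∀ s, pvBnd xs (s + 1) = (pvBnd xs s).map (· + 1) := by
  induction xs with
  | nil => intro s; simp [pvBnd, PySem.List.enumerate]
  | cons x xs ih => intro s; rw [pvBnd_cons, pvBnd_cons, ih (s+1)]; split <;> simp

lemma pvBnd_nonneg (xs : List String) : ∀ s, ∀ b ∈ pvBnd xs s, s ≤ b := by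
  induction xs with
  | nil => intro s b hb; simp [pvBnd, PySem.List.enumerate] at hb
  | cons x xs ih =>
    intro s b hb
    rw [pvBnd_cons] at hb
    rcases List.mem_append.1 hb with h | h
    · split at h <;> simp at h; omega
    · have := ih (s+1) b h; omega

lemma pvBnd_nil_forall (xs : List String) : ∀ s, pvBnd xs s = [] → ∀ l ∈ xs, pvIsB l = false := by
  induction xs with
  | nil => simp
  | cons x xs ih =>
    intro s h l hl
    rw [pvBnd_cons] at h
    rcases List.append_eq_nil_iff.1 h with ⟨h1, h2⟩
    rcases hl with _ | hl
    · by_contra hb; simp [Bool.not_eq_false] at hb; simp [hb] at h1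
    · exact ih (s+1) h2 l (by assumption)

lemma pvTakeHead (xs : List String) :
    xs.take ((pvBnd xs 0).headD (xs.length : Int)).toNat = xs.takeWhile (fun x => !pvIsB x) := by
  induction xs with
  | nil => simp
  | cons x xs ih =>
    rw [pvBnd_cons]
    by_cases hx : pvIsB x
    · simp [hx]
    · have hsh : pvBnd xs (0+1) = List.map (fun t => t + 1) (pvBnd xs 0) := pvBnd_shift xs 0
      simp only [hx, if_neg, Bool.false_eq_true, not_false_eq_true, List.nil_append, hsh,
        List.takeWhile_cons, Bool.not_false, if_true]
      cases h : pvBnd xs 0 with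
      | nil => simp [h] at ih ⊢; exact ih
      | cons b bs =>
        have hb0 : (0:Int) ≤ b := pvBnd_nonneg xs 0 b (by rw [h]; exact List.mem_cons_self)
        simp [h] at ih ⊢
        rw [show (b+1).toNat = b.toNat + 1 from by omega, List.take_succ_cons, ih]

lemma pvShiftSeg (x : String) (xs : List String) :
    (((pvBnd xs 0).map (· + 1)).zip ((((pvBnd xs 0).map (· + 1)).drop 1) ++ [((xs.length : Int) + 1)])).map
        (pvItem (x :: xs)) = pvSegs xs := by
  rw [pvSegs, List.map_drop.symm,
    show [((xs.length : Int) + 1)] = List.map (· + 1) [(xs.length : Int)] from rfl,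
    ← List.map_append, List.zip_map, List.map_map]
  apply List.map_congr_left
  intro ⟨b, e⟩ hmem
  obtain ⟨hb, he⟩ := List.of_mem_zip hmem
  have hb0 : 0 ≤ b := pvBnd_nonneg xs 0 b hb
  have he0 : 0 ≤ e := by
    rcases List.mem_append.1 he with h | h
    · exact pvBnd_nonneg xs 0 e (List.mem_of_mem_drop h)
    · simp at h; omega
  simpa using pvItem_shift x xs b e hb0 he0

set_option maxHeartbeats 1000000 in

set_option maxHeartbeats 1000000 in
lemma pvSegs_eq (xs : List String) : pvSegs xs = pvG xs := by
  induction xs with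
  | nil => rfl
  | cons x xs ih =>
    by_cases hx : pvIsB x
    · rw [pvG, if_pos hx, ← ih]
      have hsh : pvBnd xs 1 = List.map (fun t => t + 1) (pvBnd xs 0) := by
        have := pvBnd_shift xs 0; norm_num at this; exact this
      rw [pvSegs, pvBnd_cons, if_pos hx]
      norm_num
      rw [hsh]
      cases h : pvBnd xs 0 with
      | nil =>
        have hall := pvBnd_nil_forall xs 0 h
        have h1 : PySem.List.pyGet? (x :: xs) (0:Int) = some x := by
          simp [PySem.List.pyGet?, PySem.List.pyIdx?]
        have h2 : PySem.List.slice (x :: xs) (some 0) (some ((xs.length : Int) + 1)) = x :: xs := by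
          rw [show ((xs.length : Int) + 1) = ((xs.length + 1 : Nat) : Int) from by push_cast; ring,
            show (0 : Int) = ((0 : Nat) : Int) from rfl, PySem.List.slice_natCast]
          simp
        have hhead : pvItem (x :: xs) (0, (xs.length : Int) + 1) =
            pvMk x (x :: xs.takeWhile (fun t => !pvIsB t)) := by
          have htw : List.takeWhile (fun t => !pvIsB t) xs = xs :=
            List.takeWhile_eq_self_iff.2 (by intro l hl; simp [hall l hl])
          rw [pvItem, pvMk, h1, h2, htw]
          simp
        simp only [List.map_nil, List.nil_append, List.zip_cons_cons, List.zip_nil_right,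
          List.map_cons, List.map_nil, pvSegs, h, List.zip_nil_left, hhead]
      | cons b bs =>
        have hb0 : (0:Int) ≤ b := pvBnd_nonneg xs 0 b (by rw [h]; exact List.mem_cons_self)
        have h1 : PySem.List.pyGet? (x :: xs) (0:Int) = some x := by
          simp [PySem.List.pyGet?, PySem.List.pyIdx?]
        have h2 : PySem.List.slice (x :: xs) (some 0) (some (b + 1)) =
            x :: xs.takeWhile (fun t => !pvIsB t) := by
          rw [show (b + 1) = ((b.toNat + 1 : Nat) : Int) from by push_cast; omega,
            show (0 : Int) = ((0 : Nat) : Int) from rfl, PySem.List.slice_natCast]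
          simp only [Nat.sub_zero, List.drop_zero, List.take_succ_cons]
          have := pvTakeHead xs
          rw [h] at this
          simpa using this
        have hhead : pvItem (x :: xs) (0, b + 1) =
            pvMk x (x :: xs.takeWhile (fun t => !pvIsB t)) := by
          rw [pvItem, pvMk, h1, h2]
          simp
        have htail := pvShiftSeg x xs
        rw [h] at htail
        simp only [List.map_cons, List.cons_append, List.zip_cons_cons, List.map_cons, hhead]
        rw [← htail]
        simp
    · rw [pvG, if_neg hx, ← ih]
      rw [pvSegs, pvBnd_cons, if_neg hx]
      have hsh : pvBnd xs 1 = List.map (fun t => t + 1) (pvBnd xs 0) := by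
        have := pvBnd_shift xs 0; norm_num at this; exact this
      norm_num
      rw [hsh]
      simpa [← List.drop_one] using pvShiftSeg x xs

lemma pvL2 (ls : List String) : ∀ (tcs : List (PySem.Dict String String))
    (c : PySem.Dict String String) (buf : List String),
    pvFinA (ls.foldl pvStepA (tcs, some c, buf)) =
      tcs.map (fun (d : PySem.Dict String String) => d.items) ++
        (c.insert "full_description"
          (PySem.Str.join "\n" (buf ++ (ls.map PySem.Str.strip).takeWhile (fun x => !pvIsB x)))).items ::
        pvG (ls.map PySem.Str.strip) := by
  induction ls with
  | nil => intro tcs c buf; simp [pvFinA, pvG]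
  | cons l ls ih =>
    intro tcs c buf
    by_cases hl : pvIsB (PySem.Str.strip l)
    · rw [List.foldl_cons, show pvStepA (tcs, some c, buf) l =
        (tcs ++ [c.insert "full_description" (PySem.Str.join "\n" buf)],
         some ((PySem.Dict.empty.insert "name"
            (PySem.Str.strip (PySem.Str.slice (PySem.Str.strip l) (some 5) none))).insert "full_description" ""),
         [PySem.Str.strip l]) from by simp [pvStepA, pvIsB] at hl ⊢; simp [hl]]
      rw [ih]
      simp only [List.map_cons]
      rw [pvG]
      simp only [hl, if_true, List.takeWhile_cons, Bool.not_true]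
      rw [pvItemsLit, pvMk]
      simp [List.append_assoc]
    · rw [List.foldl_cons, show pvStepA (tcs, some c, buf) l =
        (tcs, some c, buf ++ [PySem.Str.strip l]) from by
          simp [pvStepA, pvIsB] at hl ⊢; simp [hl]]
      rw [ih]
      simp only [List.map_cons]
      rw [pvG]
      simp [hl, List.append_assoc]

lemma pvL1 (ls : List String) : ∀ (tcs : List (PySem.Dict String String)) (buf : List String),
    pvFinA (ls.foldl pvStepA (tcs, none, buf)) =
      tcs.map (fun (d : PySem.Dict String String) => d.items) ++ pvG (ls.map PySem.Str.strip) := by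
  induction ls with
  | nil => intro tcs buf; simp [pvFinA, pvG]
  | cons l ls ih =>
    intro tcs buf
    by_cases hl : pvIsB (PySem.Str.strip l)
    · rw [List.foldl_cons, show pvStepA (tcs, none, buf) l =
        (tcs,
         some ((PySem.Dict.empty.insert "name"
            (PySem.Str.strip (PySem.Str.slice (PySem.Str.strip l) (some 5) none))).insert "full_description" ""),
         [PySem.Str.strip l]) from by simp [pvStepA, pvIsB] at hl ⊢; simp [hl]]
      rw [pvL2]
      simp only [List.map_cons]
      rw [pvG]
      simp only [hl, if_true]
      rw [pvItemsLit, pvMk]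
      simp
    · rw [List.foldl_cons, show pvStepA (tcs, none, buf) l = (tcs, none, buf) from by
          simp [pvStepA, pvIsB] at hl ⊢; simp [hl]]
      rw [ih]
      simp only [List.map_cons]
      rw [pvG]
      simp [hl]

-- ===== VERDICT (by name: the statement is the Claim_ definition above) =====
theorem parse_test_cases_spec : Claim_equal_parse_test_cases := by
  intro raw_text format _
  show parse_test_cases raw_text format = parse_test_cases_alt raw_text format
  by_cases h : format == "bdd"
  · simp only [parse_test_cases, parse_test_cases_alt, if_pos h]
  · have ha : parse_test_cases raw_text format =
        pvFinA (((PySem.Str.split? raw_text "\n").getD []).foldl pvStepA ([], none, [])) := by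
      simp only [parse_test_cases, if_neg h]
      rfl
    have hb : parse_test_cases_alt raw_text format =
        pvSegs (((PySem.Str.split? raw_text "\n").getD []).map PySem.Str.strip) := by
      simp only [parse_test_cases_alt, if_neg h]
      rfl
    rw [ha, hb, pvL1, pvSegs_eq]
    simp
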